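-- pv_equiv track=rewrite | github.com/tdas11235/DA6401-assignment-02 | partA/test.py | get_kernel
-- ===== SOURCE A (Python) =====
-- CONV_SIZE = 5
--
-- def get_kernel(start_kernel: int, org: str) -> list:
--     pattern = [start_kernel]
--     for _ in range(1, CONV_SIZE):
--         if org == 'decrease':
--             next_kernel = max(3, pattern[-1] - 2)
--         elif org == 'same':
--             next_kernel = pattern[-1]
--         else:
--             raise NotImplementedError
--         pattern.append(next_kernel)
--     return pattern
-- ===== SOURCE B (Python) =====
-- CONV_SIZE = 5
--
-- def get_kernel(start_kernel: int, org: str) -> list: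
--     if org == 'decrease':
--         return [start_kernel] + [max(3, start_kernel - 2 * i) for i in range(1, CONV_SIZE)]
--     if org == 'same':
--         return [start_kernel] * CONV_SIZE
--     raise NotImplementedError
-- ===== Notes on version B (the rewrite author's own statement) =====
-- stated objective: simpler
-- what changed: Each element is computed independently by the closed form max(3, start_kernel - 2*i) (or replicated for 'same') instead of accumulating from the previous element in a loop.
import Mathlib
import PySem

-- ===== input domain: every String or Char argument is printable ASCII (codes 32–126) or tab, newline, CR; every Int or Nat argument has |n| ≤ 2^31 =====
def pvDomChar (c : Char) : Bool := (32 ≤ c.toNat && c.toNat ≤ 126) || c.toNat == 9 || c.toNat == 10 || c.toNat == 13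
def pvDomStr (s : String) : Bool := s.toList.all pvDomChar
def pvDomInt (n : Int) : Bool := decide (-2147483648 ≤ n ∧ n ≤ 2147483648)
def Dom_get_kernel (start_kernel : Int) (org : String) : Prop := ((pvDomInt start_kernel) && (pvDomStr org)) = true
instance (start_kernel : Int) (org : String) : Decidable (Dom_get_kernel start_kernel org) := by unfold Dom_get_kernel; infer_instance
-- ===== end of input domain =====

-- B replaces the running-accumulator loop by an index-wise closed form max(3, start_kernel - 2*i) (simpler, same cost).
-- ===== PORT A =====
-- literal transliteration of A: build the pattern list by appending max(3, prev-2) / prev;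
-- on an org where A raises NotImplementedError (outside Pre_) the loop body leaves pattern unchanged.
def get_kernel (start_kernel : Int) (org : String) : List Int :=
  (PySem.List.pyRange 1 5 1).foldl
    (fun pattern _ =>
      if org == "decrease" then
        pattern ++ [max 3 ((PySem.List.pyGet? pattern (-1)).getD 0 - 2)]
      else if org == "same" then
        pattern ++ [(PySem.List.pyGet? pattern (-1)).getD 0]
      else pattern)
    [start_kernel]

-- ===== PORT B =====
def get_kernel_alt (start_kernel : Int) (org : String) : List Int :=
  if org == "decrease" then
    start_kernel :: (PySem.List.pyRange 1 5 1).map (fun i => max 3 (start_kernel - 2 * i))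
  else if org == "same" then
    List.replicate 5 start_kernel
  else []

-- ===== PRECONDITION & SPEC =====
-- Pre_ excludes exactly the org values on which A raises NotImplementedError (B raises too).
def Pre_get_kernel (start_kernel : Int) (org : String) : Prop := org = "decrease" ∨ org = "same"
instance (start_kernel : Int) (org : String) : Decidable (Pre_get_kernel start_kernel org) := by unfold Pre_get_kernel; infer_instance
def pvWitness_get_kernel : Int × String := (7, "decrease")
def Spec_get_kernel (start_kernel : Int) (org : String) (out : List Int) : Prop := out = get_kernel_alt start_kernel org
instance (start_kernel : Int) (org : String) (out : List Int) : Decidable (Spec_get_kernel start_kernel org out) := by unfold Spec_get_kernel; infer_instance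

-- ===== CLAIM (what is proved, stated in full; the proofs are below) =====
def Claim_equal_get_kernel : Prop := ∀ (start_kernel : Int) (org : String), Dom_get_kernel start_kernel org → Pre_get_kernel start_kernel org → Spec_get_kernel start_kernel org (get_kernel start_kernel org)

-- ===== LEMMAS AND PROOFS =====

-- ===== VERDICT (by name: the statement is the Claim_ definition above) =====
theorem get_kernel_spec : Claim_equal_get_kernel := by
  intro s org _ hpre
  unfold Spec_get_kernel get_kernel get_kernel_alt
  rcases hpre with h | h <;> subst h <;>
    simp [PySem.List.pyRange, PySem.List.pyGet?, PySem.List.pyIdx?, List.range_succ, List.replicate] <;> omega
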